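-- pv_equiv track=rewrite | github.com/justinxu421/recipe_rex | feature_generation/label_recipes.py | label_meat
-- ===== SOURCE A (Python) =====
-- def label_meat(ing, include, exclude):
--     for i_ in ing:
--         i_ = i_.lower()
--         # check if any meats are present in ingredient
--         for meat in include:
--             if meat in i_:
--                 # check if all excluded terms are not present too
--                 if all([e not in i_ for e in exclude]):
--                     return 1
--     return 0
-- ===== SOURCE B (Python) =====
-- def label_meat(ing, include, exclude):
--     # Stage 1: one pass over ingredients, keeping lowercased ones with no exclude term.
--     clean = []
--     for i_ in ing:
--         il = i_.lower()
--         ok = True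
--         for e in exclude:
--             if e in il:
--                 ok = False
--                 break
--         if ok:
--             clean.append(il)
--     # Stage 2: transposed traversal — outer loop over include terms, inner over clean list.
--     for meat in include:
--         for il in clean:
--             if meat in il:
--                 return 1
--     return 0
-- ===== Notes on version B (the rewrite author's own statement) =====
-- stated objective: faster
-- what changed: B transposes the traversal: one filtering pass builds the lowercased exclude-free ingredient list (so the exclude scan runs once per ingredient), then an include-major scan (outer loop over include terms, inner over the precomputed clean list) replaces A's ingredient-major nested loop that re-lowercases and re-runs the full exclude scan for every matching include term; order does not matter because the result is an existence flag, proved in Lean.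
import Mathlib
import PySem

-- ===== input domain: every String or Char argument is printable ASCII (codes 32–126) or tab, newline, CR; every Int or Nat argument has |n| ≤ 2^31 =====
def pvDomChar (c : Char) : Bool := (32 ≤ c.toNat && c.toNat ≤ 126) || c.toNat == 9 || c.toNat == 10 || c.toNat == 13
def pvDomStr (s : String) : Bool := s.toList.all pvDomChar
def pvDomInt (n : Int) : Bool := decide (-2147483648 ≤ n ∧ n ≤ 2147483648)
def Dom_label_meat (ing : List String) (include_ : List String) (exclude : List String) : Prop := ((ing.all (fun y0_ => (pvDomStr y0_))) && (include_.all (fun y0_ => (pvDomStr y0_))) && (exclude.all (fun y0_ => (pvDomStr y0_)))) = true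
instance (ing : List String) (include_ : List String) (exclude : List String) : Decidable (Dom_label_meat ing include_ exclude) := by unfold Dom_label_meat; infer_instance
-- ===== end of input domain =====

-- B transposes the traversal: one filtering pass builds the lowercased exclude-free list, then
-- an include-major scan (outer loop over include terms) replaces A's ingredient-major nested loop.

-- ===== PORT A =====
-- inner 'for meat in include: if meat in i_: if all(e not in i_ …): return 1'
def labelMeatInner (il : String) (include_ : List String) (exclude : List String) : Bool :=
  match include_ with
  | [] => false
  | meat :: rest =>
    if PySem.Str.isIn meat il then
      if exclude.all (fun e => !(PySem.Str.isIn e il)) then true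
      else labelMeatInner il rest exclude
    else labelMeatInner il rest exclude

def label_meat (ing : List String) (include_ : List String) (exclude : List String) : Int :=
  match ing with
  | [] => 0
  | i :: rest =>
    let il := PySem.Str.lower i
    if labelMeatInner il include_ exclude then 1
    else label_meat rest include_ exclude

-- ===== PORT B =====
-- 'ok' flag loop with break: false as soon as some exclude term occurs
def altOk (il : String) (exclude : List String) : Bool :=
  match exclude with
  | [] => true
  | e :: rest => if PySem.Str.isIn e il then false else altOk il rest

-- Stage 1: build the clean list of lowercased, exclude-free ingredients
def altClean (ing : List String) (exclude : List String) : List String :=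
  match ing with
  | [] => []
  | i :: rest =>
    let il := PySem.Str.lower i
    if altOk il exclude then il :: altClean rest exclude
    else altClean rest exclude

-- Stage 2 inner loop: 'for il in clean: if meat in il: return 1'
def altInner (meat : String) (clean : List String) : Bool :=
  match clean with
  | [] => false
  | il :: rest => if PySem.Str.isIn meat il then true else altInner meat rest

-- Stage 2 outer loop over include terms
def altOuter (clean : List String) (include_ : List String) : Int :=
  match include_ with
  | [] => 0
  | meat :: rest => if altInner meat clean then 1 else altOuter clean rest

def label_meat_alt (ing : List String) (include_ : List String) (exclude : List String) : Int :=
  altOuter (altClean ing exclude) include_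

-- ===== PRECONDITION & SPEC =====
def Spec_label_meat (ing : List String) (include_ : List String) (exclude : List String) (out : Int) : Prop := out = label_meat_alt ing include_ exclude
instance (ing : List String) (include_ : List String) (exclude : List String) (out : Int) : Decidable (Spec_label_meat ing include_ exclude out) := by unfold Spec_label_meat; infer_instance

-- ===== CLAIM (what is proved, stated in full; the proofs are below) =====
def Claim_equal_label_meat : Prop := ∀ (ing : List String) (include_ : List String) (exclude : List String), Dom_label_meat ing include_ exclude → Spec_label_meat ing include_ exclude (label_meat ing include_ exclude)

-- ===== LEMMAS AND PROOFS =====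

theorem altOk_eq (il : String) (exclude : List String) :
    altOk il exclude = exclude.all (fun e => !(PySem.Str.isIn e il)) := by
  induction exclude with
  | nil => rfl
  | cons e rest ih =>
    simp only [altOk, List.all_cons, ih]
    cases h : PySem.Str.isIn e il <;> simp

theorem altInner_eq (meat : String) (clean : List String) :
    altInner meat clean = clean.any (fun il => PySem.Str.isIn meat il) := by
  induction clean with
  | nil => rfl
  | cons il rest ih =>
    simp only [altInner, List.any_cons, ih]
    cases h : PySem.Str.isIn meat il <;> simp

theorem altOuter_eq (clean : List String) (include_ : List String) :
    altOuter clean include_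
      = (if include_.any (fun m => clean.any (fun il => PySem.Str.isIn m il)) then (1 : Int) else 0) := by
  induction include_ with
  | nil => rfl
  | cons m rest ih =>
    simp only [altOuter, altInner_eq, List.any_cons, ih]
    by_cases h : clean.any (fun il => PySem.Str.isIn m il) = true
    · simp only [h, Bool.true_or, if_true]
    · rw [Bool.not_eq_true] at h
      simp only [h, Bool.false_or, Bool.false_eq_true, if_false]

theorem altClean_any (ing : List String) (exclude : List String) (p : String → Bool) :
    (altClean ing exclude).any p
      = ing.any (fun i => altOk (PySem.Str.lower i) exclude && p (PySem.Str.lower i)) := by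
  induction ing with
  | nil => rfl
  | cons i rest ih =>
    simp only [altClean, List.any_cons]
    cases h : altOk (PySem.Str.lower i) exclude
    · simp [ih]
    · simp [List.any_cons, ih]

theorem labelMeatInner_eq (il : String) (include_ : List String) (exclude : List String) :
    labelMeatInner il include_ exclude
      = (exclude.all (fun e => !(PySem.Str.isIn e il)) && include_.any (fun m => PySem.Str.isIn m il)) := by
  induction include_ with
  | nil => simp only [labelMeatInner, List.any_nil, Bool.and_false]
  | cons m rest ih =>
    simp only [labelMeatInner, List.any_cons, ih]
    cases h1 : PySem.Str.isIn m il with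
    | false => simp
    | true =>
      cases h2 : exclude.all (fun e => !(PySem.Str.isIn e il)) <;> simp

theorem label_meat_eq (ing : List String) (include_ : List String) (exclude : List String) :
    label_meat ing include_ exclude
      = (if ing.any (fun i => exclude.all (fun e => !(PySem.Str.isIn e (PySem.Str.lower i)))
              && include_.any (fun m => PySem.Str.isIn m (PySem.Str.lower i))) then (1 : Int) else 0) := by
  induction ing with
  | nil => rfl
  | cons i rest ih =>
    simp only [label_meat, labelMeatInner_eq, List.any_cons, ih]
    by_cases h : (exclude.all (fun e => !(PySem.Str.isIn e (PySem.Str.lower i)))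
        && include_.any (fun m => PySem.Str.isIn m (PySem.Str.lower i))) = true
    · simp only [h, Bool.true_or, if_true]
    · rw [Bool.not_eq_true] at h
      simp only [h, Bool.false_or, Bool.false_eq_true, if_false]

-- the traversal transposition: swapping the two existential scans preserves the flag
theorem any_swap (ing : List String) (include_ : List String) (exclude : List String) :
    include_.any (fun m => ing.any (fun i =>
        altOk (PySem.Str.lower i) exclude && PySem.Str.isIn m (PySem.Str.lower i)))
      = ing.any (fun i => altOk (PySem.Str.lower i) exclude
          && include_.any (fun m => PySem.Str.isIn m (PySem.Str.lower i))) := by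
  rw [Bool.eq_iff_iff]
  simp only [List.any_eq_true, Bool.and_eq_true]
  constructor
  · rintro ⟨m, hm, i, hi, hok, hin⟩
    exact ⟨i, hi, hok, m, hm, hin⟩
  · rintro ⟨i, hi, hok, m, hm, hin⟩
    exact ⟨m, hm, i, hi, hok, hin⟩

theorem label_meat_eq_alt (ing : List String) (include_ : List String) (exclude : List String) :
    label_meat ing include_ exclude = label_meat_alt ing include_ exclude := by
  rw [label_meat_eq, label_meat_alt, altOuter_eq]
  have h : include_.any (fun m => (altClean ing exclude).any (fun il => PySem.Str.isIn m il))
      = ing.any (fun i => exclude.all (fun e => !(PySem.Str.isIn e (PySem.Str.lower i)))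
          && include_.any (fun m => PySem.Str.isIn m (PySem.Str.lower i))) := by
    simp only [altClean_any]
    rw [any_swap]
    simp only [altOk_eq]
  rw [h]

-- ===== VERDICT (by name: the statement is the Claim_ definition above) =====
theorem label_meat_spec : Claim_equal_label_meat := by
  intro ing include_ exclude _
  exact label_meat_eq_alt ing include_ exclude
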